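-- pv_equiv track=rewrite | github.com/alibaba/EasyCV | tools/prepare_data/convert_det_itag2raw.py | get_prior_task_id
-- ===== SOURCE A (Python) =====
-- def get_prior_task_id(keys):
--     """"The task id ends with `check` is the highest priority.
--     """
--     k_list = []
--     check_k_list = []
--     verify_k_list = []
--     for k in keys:
--         if k.startswith('label-'):
--             if k.endswith('check'):
--                 check_k_list.append(k)
--             elif k.endswith('verify'):
--                 verify_k_list.append(k)
--             else:
--                 k_list.append(k)
--
--     if len(check_k_list):
--         return check_k_list
--     if len(k_list):
--         return k_list
--     if len(verify_k_list):
--         return verify_k_list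
--
--     return []
-- ===== SOURCE B (Python) =====
-- def get_prior_task_id(keys):
--     def rank(k):
--         if not k.startswith('label-'):
--             return None
--         if k.endswith('check'):
--             return 0
--         if k.endswith('verify'):
--             return 2
--         return 1
--     ranks = [rank(k) for k in keys]
--     valid = [r for r in ranks if r is not None]
--     if not valid:
--         return []
--     best = min(valid)
--     return [k for k, r in zip(keys, ranks) if r == best]
-- ===== Notes on version B (the rewrite author's own statement) =====
-- stated objective: alternative
-- what changed: Replaces A's three suffix buckets plus a len()-ladder by a rank/argmin selection: each key gets a numeric priority (check=0, other=1, verify=2, non-label=None), the minimum present rank is computed, and the keys of that rank are selected in one filter.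
import Mathlib
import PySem

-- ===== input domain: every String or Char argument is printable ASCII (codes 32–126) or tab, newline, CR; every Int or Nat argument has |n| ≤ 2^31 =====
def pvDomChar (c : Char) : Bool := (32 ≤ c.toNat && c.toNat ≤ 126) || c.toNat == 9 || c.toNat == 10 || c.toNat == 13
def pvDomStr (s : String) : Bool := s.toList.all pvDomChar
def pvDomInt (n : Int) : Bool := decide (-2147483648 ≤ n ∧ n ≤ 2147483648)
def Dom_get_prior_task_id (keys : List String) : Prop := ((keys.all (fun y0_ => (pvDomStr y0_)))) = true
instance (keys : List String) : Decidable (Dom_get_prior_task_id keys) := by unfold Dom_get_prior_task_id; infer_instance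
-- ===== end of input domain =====

-- B replaces A's three suffix buckets + len()-ladder by a rank/argmin selection (alternative algorithm, same cost).


-- ===== PORT A =====
-- single pass building (k_list, check_k_list, verify_k_list), then the len() ladder
def get_prior_task_id (keys : List String) : List String :=
  let st := keys.foldl (fun (st : List String × List String × List String) k =>
    if PySem.Str.startswith k "label-" then
      if PySem.Str.endswith k "check" then (st.1, st.2.1 ++ [k], st.2.2)
      else if PySem.Str.endswith k "verify" then (st.1, st.2.1, st.2.2 ++ [k])
      else (st.1 ++ [k], st.2.1, st.2.2)
    else st) ([], [], [])
  if st.2.1.length ≠ 0 then st.2.1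
  else if st.1.length ≠ 0 then st.1
  else if st.2.2.length ≠ 0 then st.2.2
  else []

-- ===== PORT B =====
-- numeric priority of a key: check=0, plain label=1, verify=2, non-label = None
def pvRank (k : String) : Option Int :=
  if !(PySem.Str.startswith k "label-") then none
  else if PySem.Str.endswith k "check" then some 0
  else if PySem.Str.endswith k "verify" then some 2
  else some 1

def get_prior_task_id_alt (keys : List String) : List String :=
  let ranks := keys.map pvRank
  let valid := ranks.filterMap id
  if valid.isEmpty then []
  else
    match PySem.List.min? valid (fun r => r) with   -- min(valid); none is unreachable (valid nonempty)
    | none => []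
    | some best => ((keys.zip ranks).filter (fun p => p.2 == some best)).map Prod.fst

-- ===== PRECONDITION & SPEC =====
def Spec_get_prior_task_id (keys : List String) (out : List String) : Prop := out = get_prior_task_id_alt keys
instance (keys : List String) (out : List String) : Decidable (Spec_get_prior_task_id keys out) := by unfold Spec_get_prior_task_id; infer_instance

-- ===== CLAIM (what is proved, stated in full; the proofs are below) =====
def Claim_equal_get_prior_task_id : Prop := ∀ (keys : List String), Dom_get_prior_task_id keys → Spec_get_prior_task_id keys (get_prior_task_id keys)

-- ===== LEMMAS AND PROOFS =====

-- A's loop state equals three filters (appended to the initial state).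
theorem get_prior_task_id_fold_eq (keys : List String) (a b c : List String) :
    keys.foldl (fun (st : List String × List String × List String) k =>
      if PySem.Str.startswith k "label-" then
        if PySem.Str.endswith k "check" then (st.1, st.2.1 ++ [k], st.2.2)
        else if PySem.Str.endswith k "verify" then (st.1, st.2.1, st.2.2 ++ [k])
        else (st.1 ++ [k], st.2.1, st.2.2)
      else st) (a, b, c)
    = (a ++ keys.filter (fun k => PySem.Str.startswith k "label-"
              && !(PySem.Str.endswith k "check") && !(PySem.Str.endswith k "verify")),
       b ++ keys.filter (fun k => PySem.Str.startswith k "label-"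
              && PySem.Str.endswith k "check"),
       c ++ keys.filter (fun k => PySem.Str.startswith k "label-"
              && !(PySem.Str.endswith k "check") && PySem.Str.endswith k "verify")) := by
  induction keys generalizing a b c with
  | nil => simp
  | cons k ks ih =>
    simp only [List.foldl_cons, List.filter_cons]
    by_cases hs : PySem.Str.startswith k "label-" = true
    · by_cases hc : PySem.Str.endswith k "check" = true
      · simp only [hs, hc, if_true, Bool.not_true, Bool.and_true,
          Bool.false_and, Bool.and_false, Bool.false_eq_true, ite_false, ih,
          List.append_assoc, List.singleton_append]
      · by_cases hv : PySem.Str.endswith k "verify" = true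
        · simp only [Bool.not_eq_true] at hc
          simp only [hs, hc, hv, Bool.not_false, Bool.not_true, Bool.true_and,
            Bool.and_true, Bool.and_false, Bool.false_eq_true, ite_true, ite_false,
            ih, List.append_assoc, List.singleton_append]
        · simp only [Bool.not_eq_true] at hc hv
          simp only [hs, hc, hv, Bool.not_false, Bool.and_true,
            Bool.and_false, Bool.false_eq_true, ite_true, ite_false, ih,
            List.append_assoc, List.singleton_append]
    · simp only [Bool.not_eq_true] at hs
      simp only [hs, Bool.false_and, Bool.false_eq_true, ite_false, ih]

-- B's zip-with-ranks filter is a plain filter on the keys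
theorem pv_zip_map_filter (keys : List String) (v : Option Int) :
    (((keys.zip (keys.map pvRank)).filter (fun p => p.2 == v)).map Prod.fst)
      = keys.filter (fun k => pvRank k == v) := by
  induction keys with
  | nil => rfl
  | cons k ks ih =>
    by_cases h : pvRank k == v
    · simp [h, ih]
    · simp [h, ih]

theorem pv_rank_cases (k : String) (r : Int) (h : pvRank k = some r) :
    r = 0 ∨ r = 1 ∨ r = 2 := by
  unfold pvRank at h
  split_ifs at h <;> simp_all

-- pvRank = some r ↔ the corresponding bucket predicate of A
theorem pv_rank0 (k : String) : (pvRank k == some 0)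
    = (PySem.Str.startswith k "label-" && PySem.Str.endswith k "check") := by
  unfold pvRank; split_ifs <;> simp_all
theorem pv_rank1 (k : String) : (pvRank k == some 1)
    = (PySem.Str.startswith k "label-" && !(PySem.Str.endswith k "check")
        && !(PySem.Str.endswith k "verify")) := by
  unfold pvRank; split_ifs <;> simp_all
theorem pv_rank2 (k : String) : (pvRank k == some 2)
    = (PySem.Str.startswith k "label-" && !(PySem.Str.endswith k "check")
        && PySem.Str.endswith k "verify") := by
  unfold pvRank; split_ifs <;> simp_all

-- a rank value occurs in valid iff the corresponding filter is nonempty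
theorem pv_mem_valid_iff (keys : List String) (r : Int) :
    r ∈ keys.filterMap pvRank ↔ keys.filter (fun k => pvRank k == some r) ≠ [] := by
  rw [List.mem_filterMap, Ne, List.filter_eq_nil_iff]
  push_neg
  constructor
  · rintro ⟨k, hk, hr⟩; exact ⟨k, hk, by simp [hr]⟩
  · rintro ⟨k, hk, hr⟩; exact ⟨k, hk, by simpa using hr⟩

-- PySem.List.min? of a nonempty list is some
theorem pv_min?_isSome (xs : List Int) (h : xs ≠ []) :
    ∃ b, PySem.List.min? xs (fun r => r) = some b := by
  unfold PySem.List.min?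
  cases xs with
  | nil => exact absurd rfl h
  | cons x xs =>
    clear h
    simp only [List.foldl_cons]
    induction xs generalizing x with
    | nil => exact ⟨x, rfl⟩
    | cons y ys ih =>
      simp only [List.foldl_cons]
      by_cases hy : y < x
      · simpa [hy] using ih y
      · simpa [hy] using ih x

-- ===== VERDICT (by name: the statement is the Claim_ definition above) =====
theorem get_prior_task_id_spec : Claim_equal_get_prior_task_id := by
  intro keys _
  unfold Spec_get_prior_task_id get_prior_task_id get_prior_task_id_alt
  rw [get_prior_task_id_fold_eq]
  simp only [List.nil_append, List.filterMap_map, Function.id_comp]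
  set valid := keys.filterMap pvRank with hvalid
  by_cases hv : valid = []
  · -- no label- key at all: all three buckets are empty
    have hstart : ∀ k ∈ keys, PySem.Str.startswith k "label-" = false := by
      intro k hk
      have h := List.filterMap_eq_nil_iff.mp hv k hk
      unfold pvRank at h
      split_ifs at h with h1
      · simpa using h1
    simp at hstart
    have h1 : keys.filter (fun k => PySem.Str.startswith k "label-"
        && PySem.Str.endswith k "check") = [] :=
      List.filter_eq_nil_iff.mpr (fun k hk => by simp [hstart k hk])
    have h2 : keys.filter (fun k => PySem.Str.startswith k "label-"
        && !(PySem.Str.endswith k "check") && !(PySem.Str.endswith k "verify")) = [] :=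
      List.filter_eq_nil_iff.mpr (fun k hk => by simp [hstart k hk])
    have h3 : keys.filter (fun k => PySem.Str.startswith k "label-"
        && !(PySem.Str.endswith k "check") && PySem.Str.endswith k "verify") = [] :=
      List.filter_eq_nil_iff.mpr (fun k hk => by simp [hstart k hk])
    rw [h1, h2, h3, hv]
    simp
  · -- valid nonempty: its minimum decides which bucket A returns
    obtain ⟨b, hb⟩ := pv_min?_isSome valid hv
    have hmem : b ∈ valid := PySem.List.min?_mem hb
    have hle : ∀ x ∈ valid, b ≤ x := fun x hx => PySem.List.min?_isMin hb x hx
    have hempty : valid.isEmpty = false := by simpa [List.isEmpty_iff] using hv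
    rw [hempty]
    simp only [Bool.false_eq_true, if_false, hb]
    rw [pv_zip_map_filter]
    obtain ⟨k0, hk0, hr0⟩ := List.mem_filterMap.mp hmem
    rcases pv_rank_cases k0 b hr0 with rfl | rfl | rfl
    · -- best = 0: check bucket nonempty, both return it
      have hne : keys.filter (fun k => pvRank k == some 0) ≠ [] :=
        (pv_mem_valid_iff keys 0).mp hmem
      have hlen : (keys.filter (fun k => PySem.Str.startswith k "label-"
          && PySem.Str.endswith k "check")).length ≠ 0 := by
        simp only [ne_eq, List.length_eq_zero_iff]
        simpa [List.filter_congr (fun k _ => pv_rank0 k)] using hne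
      rw [if_pos hlen]
      exact (List.filter_congr (fun k _ => pv_rank0 k)).symm
    · -- best = 1: no check key (else 1 ≤ 0), other bucket nonempty
      have h0 : (0 : Int) ∉ valid := fun h => by have := hle 0 h; omega
      have hc : keys.filter (fun k => PySem.Str.startswith k "label-"
          && PySem.Str.endswith k "check") = [] := by
        by_contra h
        exact h0 ((pv_mem_valid_iff keys 0).mpr
          (by simpa [List.filter_congr (fun k _ => pv_rank0 k)] using h))
      have hne : keys.filter (fun k => pvRank k == some 1) ≠ [] :=
        (pv_mem_valid_iff keys 1).mp hmem
      have hlen : (keys.filter (fun k => PySem.Str.startswith k "label-"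
          && !(PySem.Str.endswith k "check") && !(PySem.Str.endswith k "verify"))).length ≠ 0 := by
        simp only [ne_eq, List.length_eq_zero_iff]
        simpa [List.filter_congr (fun k _ => pv_rank1 k)] using hne
      rw [if_neg (by rw [hc]; simp), if_pos hlen]
      exact (List.filter_congr (fun k _ => pv_rank1 k)).symm
    · -- best = 2: no check key, no plain label key, verify bucket nonempty
      have h0 : (0 : Int) ∉ valid := fun h => by have := hle 0 h; omega
      have h1 : (1 : Int) ∉ valid := fun h => by have := hle 1 h; omega
      have hc : keys.filter (fun k => PySem.Str.startswith k "label-"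
          && PySem.Str.endswith k "check") = [] := by
        by_contra h
        exact h0 ((pv_mem_valid_iff keys 0).mpr
          (by simpa [List.filter_congr (fun k _ => pv_rank0 k)] using h))
      have ho : keys.filter (fun k => PySem.Str.startswith k "label-"
          && !(PySem.Str.endswith k "check") && !(PySem.Str.endswith k "verify")) = [] := by
        by_contra h
        exact h1 ((pv_mem_valid_iff keys 1).mpr
          (by simpa [List.filter_congr (fun k _ => pv_rank1 k)] using h))
      have hne : keys.filter (fun k => pvRank k == some 2) ≠ [] :=
        (pv_mem_valid_iff keys 2).mp hmem
      have hlen : (keys.filter (fun k => PySem.Str.startswith k "label-"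
          && !(PySem.Str.endswith k "check") && PySem.Str.endswith k "verify")).length ≠ 0 := by
        simp only [ne_eq, List.length_eq_zero_iff]
        simpa [List.filter_congr (fun k _ => pv_rank2 k)] using hne
      rw [if_neg (by rw [hc]; simp), if_neg (by rw [ho]; simp), if_pos hlen]
      exact (List.filter_congr (fun k _ => pv_rank2 k)).symm
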